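-- pv_equiv track=rewrite | github.com/BIAOXYZ/variousCodes | _CodeTopics/LeetCode_contest/season/2020-fall/1.py | calculate
-- ===== SOURCE A (Python) =====
-- def calculate(s):
--     """
--     :type s: str
--     :rtype: int
--     """
--
--     res = [1, 0]
--     for letter in s:
--         if letter == 'A':
--             res[0] = 2 * res[0] + res[1]
--         else:
--             res[1] = 2 * res[1] + res[0]
--     return res[0] + res[1]
-- ===== SOURCE B (Python) =====
-- def calculate(s):
--     # The pair sum res[0]+res[1] doubles on every character regardless of branch,
--     # starting at 1, so the answer is 2**len(s).
--     return 2 ** len(s)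
-- ===== Notes on version B (the rewrite author's own statement) =====
-- stated objective: faster
-- what changed: Replaced the per-character DP loop by the closed form 2**len(s), using the invariant that the pair sum doubles on every character.
import Mathlib
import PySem

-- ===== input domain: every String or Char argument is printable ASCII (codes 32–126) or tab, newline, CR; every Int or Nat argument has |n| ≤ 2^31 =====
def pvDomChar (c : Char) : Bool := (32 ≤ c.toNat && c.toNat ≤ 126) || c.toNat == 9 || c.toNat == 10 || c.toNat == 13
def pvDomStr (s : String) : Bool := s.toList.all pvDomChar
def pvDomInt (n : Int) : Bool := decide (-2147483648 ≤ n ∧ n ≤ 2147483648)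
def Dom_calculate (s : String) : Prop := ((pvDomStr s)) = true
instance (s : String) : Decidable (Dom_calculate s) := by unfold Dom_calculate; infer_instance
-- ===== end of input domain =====

-- B replaces A's linear DP loop by the closed form 2^len(s) (the pair sum doubles each step).

-- ===== PORT A =====
-- A's loop: state (res0, res1), branch on letter == 'A'
def calculateStep (r : Int × Int) (letter : Char) : Int × Int :=
  if letter = 'A' then (2 * r.1 + r.2, r.2) else (r.1, 2 * r.2 + r.1)

def calculate (s : String) : Int :=
  let res := s.toList.foldl calculateStep (1, 0)
  res.1 + res.2

-- ===== PORT B =====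
def calculate_alt (s : String) : Int := 2 ^ s.toList.length

-- ===== PRECONDITION & SPEC =====
def Spec_calculate (s : String) (out : Int) : Prop := out = calculate_alt s
instance (s : String) (out : Int) : Decidable (Spec_calculate s out) := by unfold Spec_calculate; infer_instance

-- ===== CLAIM (what is proved, stated in full; the proofs are below) =====
def Claim_equal_calculate : Prop := ∀ (s : String), Dom_calculate s → Spec_calculate s (calculate s)

-- ===== LEMMAS AND PROOFS =====
-- Invariant: the sum of the foldl state is 2^length · (initial sum).
theorem calculate_invariant (l : List Char) (r : Int × Int) :
    (l.foldl calculateStep r).1 + (l.foldl calculateStep r).2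
      = 2 ^ l.length * (r.1 + r.2) := by
  induction l generalizing r with
  | nil => simp
  | cons c t ih =>
    simp only [List.foldl_cons, List.length_cons, ih]
    unfold calculateStep
    split <;> ring

-- ===== VERDICT (by name: the statement is the Claim_ definition above) =====
theorem calculate_spec : Claim_equal_calculate := by
  intro s _
  unfold Spec_calculate calculate calculate_alt
  simp [calculate_invariant]
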